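-- pv_equiv track=rewrite | github.com/hazelcreek/gaime | gaime_builder/core/world_generator.py | _inject_style_preset
-- ===== SOURCE A (Python) =====
-- def _inject_style_preset(world_yaml: str, style_preset: str) -> str:
--     """Inject a style preset into world.yaml content.
--
--     Adds the style field after theme/tone if present, otherwise after name.
--     """
--     lines = world_yaml.split('\n')
--     result_lines = []
--     style_added = False
--
--     for i, line in enumerate(lines):
--         result_lines.append(line)
--
--         # Skip if style already exists
--         if line.strip().startswith('style:'):
--             style_added = True
--             continue
--
--         # Add style after tone, theme, or name (in that priority)
--         if not style_added:
--             stripped = line.strip()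
--             if stripped.startswith('tone:') or stripped.startswith('theme:'):
--                 # Check if next line is not indented (not a multi-line value)
--                 next_idx = i + 1
--                 while next_idx < len(lines) and lines[next_idx].strip() == '':
--                     next_idx += 1
--                 if next_idx >= len(lines) or not lines[next_idx].startswith(' '):
--                     result_lines.append(f"\n# Visual style preset for image generation")
--                     result_lines.append(f"style: {style_preset}")
--                     style_added = True
--
--     # If style wasn't added (no theme/tone found), add after name
--     if not style_added:
--         final_lines = []
--         for i, line in enumerate(result_lines):
--             final_lines.append(line)
--             if line.strip().startswith('name:') and not style_added:
--                 # Simple name: value, not multiline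
--                 if not line.strip().endswith('|'):
--                     final_lines.append(f"\n# Visual style preset for image generation")
--                     final_lines.append(f"style: {style_preset}")
--                     style_added = True
--         result_lines = final_lines
--
--     return '\n'.join(result_lines)
-- ===== SOURCE B (Python) =====
-- def _inject_style_preset(world_yaml: str, style_preset: str) -> str:
--     """Declarative reimplementation: collect the index lists of each relevant
--     pattern once, pick the insertion point by comparing first positions, splice."""
--     lines = world_yaml.split('\n')
--
--     def qualifies(i):
--         rest = [l for l in lines[i + 1:] if l.strip()]
--         return not rest or not rest[0].startswith(' ')
--
--     style_at = [i for i, l in enumerate(lines) if l.strip().startswith('style:')]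
--     tone_at = [i for i, l in enumerate(lines)
--                if (l.strip().startswith('tone:') or l.strip().startswith('theme:'))
--                and qualifies(i)]
--     first_tone = tone_at[0] if tone_at else None
--     first_style = style_at[0] if style_at else len(lines)
--
--     if first_tone is not None and first_tone < first_style:
--         idx = first_tone + 1
--     elif style_at:
--         idx = None
--     else:
--         name_at = [i for i, l in enumerate(lines)
--                    if l.strip().startswith('name:') and not l.strip().endswith('|')]
--         idx = name_at[0] + 1 if name_at else None
--
--     if idx is not None:
--         lines = lines[:idx] + ["\n# Visual style preset for image generation",
--                                f"style: {style_preset}"] + lines[idx:]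
--     return '\n'.join(lines)
-- ===== Notes on version B (the rewrite author's own statement) =====
-- stated objective: alternative
-- what changed: B replaces A's stateful accumulator scan (carrying a style_added flag and rebuilding the line list twice) by a declarative computation: it collects the index lists of style:/qualifying tone-theme/name: lines with comprehensions, decides the insertion point by comparing the first positions arithmetically (tone wins only if it precedes the first style line), and splices the two fixed lines once.
import Mathlib
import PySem

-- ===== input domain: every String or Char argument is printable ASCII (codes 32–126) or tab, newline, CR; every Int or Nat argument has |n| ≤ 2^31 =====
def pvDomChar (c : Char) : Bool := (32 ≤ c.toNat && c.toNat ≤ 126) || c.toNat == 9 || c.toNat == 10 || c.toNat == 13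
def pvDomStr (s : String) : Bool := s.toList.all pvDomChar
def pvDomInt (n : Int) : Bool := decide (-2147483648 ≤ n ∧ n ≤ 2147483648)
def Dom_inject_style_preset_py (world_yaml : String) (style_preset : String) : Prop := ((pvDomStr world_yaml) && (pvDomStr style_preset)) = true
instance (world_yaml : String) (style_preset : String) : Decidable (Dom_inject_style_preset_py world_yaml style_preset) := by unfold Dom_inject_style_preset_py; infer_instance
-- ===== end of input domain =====

-- B replaces A's stateful accumulator passes by declarative index lists: first positions of
-- style:/qualifying tone-theme/name: lines are compared arithmetically and the two fixed
-- lines are spliced once (objective: alternative decomposition, same cost).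


-- the fixed comment line both programs insert
def pvC1 : String := "\n# Visual style preset for image generation"

-- ===== PORT A =====
-- A's lookahead: while next_idx < len(lines) and lines[next_idx].strip() == '': next_idx += 1
--                then: next_idx >= len(lines) or not lines[next_idx].startswith(' ')
def pvNextOk (lines : List String) (j : Nat) : Bool :=
  if h : j < lines.length then
    if PySem.Str.strip lines[j] == "" then pvNextOk lines (j + 1)
    else !(PySem.Str.startswith lines[j] " ")
  else true
termination_by lines.length - j

-- A's first for-loop; state = (result_lines, style_added); i mirrors enumerate
def pvLoop1 (style : String) (lines : List String) :
    List String → Nat → List String → Bool → List String × Bool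
  | [], _, res, added => (res, added)
  | line :: rest, i, res, added =>
    let res := res ++ [line]
    if PySem.Str.startswith (PySem.Str.strip line) "style:" then
      pvLoop1 style lines rest (i + 1) res true
    else if !added &&
        (PySem.Str.startswith (PySem.Str.strip line) "tone:" ||
         PySem.Str.startswith (PySem.Str.strip line) "theme:") then
      if pvNextOk lines (i + 1) then
        pvLoop1 style lines rest (i + 1) (res ++ [pvC1, "style: " ++ style]) true
      else pvLoop1 style lines rest (i + 1) res added
    else pvLoop1 style lines rest (i + 1) res added

-- A's second for-loop (the name: fallback); state = (final_lines, style_added)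
def pvLoop2 (style : String) : List String → List String → Bool → List String
  | [], res, _ => res
  | line :: rest, res, added =>
    let res := res ++ [line]
    if PySem.Str.startswith (PySem.Str.strip line) "name:" && !added then
      if !(PySem.Str.endswith (PySem.Str.strip line) "|") then
        pvLoop2 style rest (res ++ [pvC1, "style: " ++ style]) true
      else pvLoop2 style rest res added
    else pvLoop2 style rest res added

def inject_style_preset_py (world_yaml : String) (style_preset : String) : String :=
  let lines := (PySem.Str.split? world_yaml "\n").getD []  -- "\n" ≠ "" so split? is some
  let r := pvLoop1 style_preset lines lines 0 [] false
  let res := if !r.2 then pvLoop2 style_preset r.1 [] false else r.1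
  PySem.Str.join "\n" res

-- ===== PORT B =====
-- Source B's qualifies(i): rest = [l for l in lines[i+1:] if l.strip()]; not rest or not rest[0].startswith(' ')
def pvQualifies (lines : List String) (i : Int) : Bool :=
  match (PySem.List.slice lines (some (i + 1)) none).filter
      (fun l => !(PySem.Str.strip l == "")) with
  | [] => true
  | h :: _ => !(PySem.Str.startswith h " ")

def inject_style_preset_py_alt (world_yaml : String) (style_preset : String) : String :=
  let lines := (PySem.Str.split? world_yaml "\n").getD []  -- "\n" ≠ "" so split? is some
  -- the three index comprehensions over enumerate(lines)
  let styleAt : List Int := (PySem.List.enumerate lines 0).filterMap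
      (fun p => if PySem.Str.startswith (PySem.Str.strip p.2) "style:" then some p.1 else none)
  let toneAt : List Int := (PySem.List.enumerate lines 0).filterMap
      (fun p => if (PySem.Str.startswith (PySem.Str.strip p.2) "tone:" ||
                    PySem.Str.startswith (PySem.Str.strip p.2) "theme:") &&
                   pvQualifies lines p.1 then some p.1 else none)
  let firstTone : Option Int := toneAt.head?
  let firstStyle : Int := (styleAt.head?).getD (lines.length : Int)
  let idx : Option Int :=
    if firstTone.any (fun t => t < firstStyle) then firstTone.map (· + 1)
    else if !styleAt.isEmpty then none
    else
      let nameAt : List Int := (PySem.List.enumerate lines 0).filterMap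
        (fun p => if PySem.Str.startswith (PySem.Str.strip p.2) "name:" &&
                     !(PySem.Str.endswith (PySem.Str.strip p.2) "|") then some p.1 else none)
      (nameAt.head?).map (· + 1)
  -- lines[:idx] + [...] + lines[idx:]
  let lines := match idx with
    | some k => PySem.List.slice lines none (some k) ++ [pvC1, "style: " ++ style_preset]
                ++ PySem.List.slice lines (some k) none
    | none => lines
  PySem.Str.join "\n" lines

-- ===== PRECONDITION & SPEC =====
def Spec_inject_style_preset_py (world_yaml : String) (style_preset : String) (out : String) : Prop := out = inject_style_preset_py_alt world_yaml style_preset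
instance (world_yaml : String) (style_preset : String) (out : String) : Decidable (Spec_inject_style_preset_py world_yaml style_preset out) := by unfold Spec_inject_style_preset_py; infer_instance

-- ===== CLAIM (what is proved, stated in full; the proofs are below) =====
def Claim_equal_inject_style_preset_py : Prop := ∀ (world_yaml : String) (style_preset : String), Dom_inject_style_preset_py world_yaml style_preset → Spec_inject_style_preset_py world_yaml style_preset (inject_style_preset_py world_yaml style_preset)

-- ===== LEMMAS AND PROOFS =====

-- proof-only: structural form of A's lookahead over the remaining lines
def pvLookOk : List String → Bool
  | [] => true
  | l :: ls => if PySem.Str.strip l == "" then pvLookOk ls else !(PySem.Str.startswith l " ")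

-- proof-only: first index ≥ i of rem satisfying P (position-aware predicate)
def pvFirstN (P : Nat → String → Bool) : List String → Nat → Option Nat
  | [], _ => none
  | l :: ls, i => if P i l then some i else pvFirstN P ls (i + 1)

-- proof-only: recursive characterisations of A's two loops
def pvFindTone (lines : List String) : List String → Nat → Bool → Option Nat × Bool
  | [], _, seen => (none, seen)
  | line :: rest, i, seen =>
    let s := PySem.Str.strip line
    if PySem.Str.startswith s "style:" then pvFindTone lines rest (i + 1) true
    else if !seen && (PySem.Str.startswith s "tone:" || PySem.Str.startswith s "theme:") then
      if pvLookOk (lines.drop (i + 1)) then (some (i + 1), seen)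
      else pvFindTone lines rest (i + 1) seen
    else pvFindTone lines rest (i + 1) seen

def pvFindName : List String → Nat → Option Nat
  | [], _ => none
  | line :: rest, i =>
    let s := PySem.Str.strip line
    if PySem.Str.startswith s "name:" && !(PySem.Str.endswith s "|") then some (i + 1)
    else pvFindName rest (i + 1)

theorem pvNextOk_eq_lookOk (lines : List String) (j : Nat) :
    pvNextOk lines j = pvLookOk (lines.drop j) := by
  induction h : lines.length - j generalizing j with
  | zero =>
    rw [pvNextOk]
    have hj : ¬ j < lines.length := by omega
    rw [dif_neg hj, List.drop_eq_nil_of_le (by omega), pvLookOk]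
  | succ n ih =>
    rw [pvNextOk]
    have hj : j < lines.length := by omega
    rw [dif_pos hj, List.drop_eq_getElem_cons hj, pvLookOk]
    by_cases hb : PySem.Str.strip lines[j] == ""
    · simp only [hb, if_pos]
      exact ih (j + 1) (by omega)
    · simp [hb]

theorem pvFindTone_seen (full : List String) (rem : List String) (i : Nat) :
    pvFindTone full rem i true = (none, true) := by
  induction rem generalizing i with
  | nil => rfl
  | cons l rest ih => rw [pvFindTone]; split <;> simp [ih]

theorem pvFindTone_gt (full : List String) (rem : List String) (i : Nat) (seen : Bool)
    (k : Nat) (b : Bool) (h : pvFindTone full rem i seen = (some k, b)) : i < k := by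
  induction rem generalizing i seen with
  | nil => simp [pvFindTone] at h
  | cons l rest ih =>
    rw [pvFindTone] at h
    split_ifs at h with h1 h2 h3
    · exact Nat.lt_of_succ_lt (ih (i + 1) true h)
    · simp only [Prod.mk.injEq, Option.some.injEq] at h; omega
    · exact Nat.lt_of_succ_lt (ih (i + 1) seen h)
    · exact Nat.lt_of_succ_lt (ih (i + 1) seen h)

theorem pvLoop1_true (style : String) (full : List String) (rem : List String) (i : Nat)
    (res : List String) : pvLoop1 style full rem i res true = (res ++ rem, true) := by
  induction rem generalizing i res with
  | nil => simp [pvLoop1]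
  | cons l rest ih => rw [pvLoop1]; split <;> simp [ih]

theorem pvLoop1_false (style : String) (full : List String) (rem : List String) (i : Nat)
    (res : List String) : pvLoop1 style full rem i res false =
      match pvFindTone full rem i false with
      | (some k, _) =>
          (res ++ rem.take (k - i) ++ [pvC1, "style: " ++ style] ++ rem.drop (k - i), true)
      | (none, seen) => (res ++ rem, seen) := by
  induction rem generalizing i res with
  | nil => simp [pvLoop1, pvFindTone]
  | cons l rest ih =>
    rw [pvLoop1, pvFindTone]
    by_cases h1 : PySem.Str.startswith (PySem.Str.strip l) "style:"
    · simp only [h1, if_pos, pvLoop1_true, pvFindTone_seen]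
      simp
    · by_cases h2 : PySem.Str.startswith (PySem.Str.strip l) "tone:" ||
          PySem.Str.startswith (PySem.Str.strip l) "theme:"
      · by_cases h3 : pvLookOk (full.drop (i + 1))
        · simp only [h1, h2, h3, Bool.not_false, Bool.true_and, if_true, if_false, if_neg,
            pvLoop1_true]
          simp [pvNextOk_eq_lookOk, h3]
        · simp only [h1, h2, h3, Bool.not_false, Bool.true_and, if_true, pvNextOk_eq_lookOk]
          rw [if_neg (by simp [h3]), ih]
          rcases hf : pvFindTone full rest (i + 1) false with ⟨o, sn⟩
          cases o with
          | none => simp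
          | some k =>
            have hk : i + 1 < k := pvFindTone_gt full rest (i + 1) false k sn hf
            have e1 : k - i = (k - (i + 1)) + 1 := by omega
            simp [e1]
      · simp only [h1, h2, Bool.not_false, Bool.true_and]
        rw [ih]
        rcases hf : pvFindTone full rest (i + 1) false with ⟨o, sn⟩
        cases o with
        | none => simp
        | some k =>
          have hk : i + 1 < k := pvFindTone_gt full rest (i + 1) false k sn hf
          have e1 : k - i = (k - (i + 1)) + 1 := by omega
          simp [e1]

theorem pvFindName_gt (rem : List String) (i : Nat) (k : Nat)
    (h : pvFindName rem i = some k) : i < k := by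
  induction rem generalizing i with
  | nil => simp [pvFindName] at h
  | cons l rest ih =>
    rw [pvFindName] at h
    split_ifs at h with h1
    · simp only [Option.some.injEq] at h; omega
    · exact Nat.lt_of_succ_lt (ih (i + 1) h)

theorem pvLoop2_true (style : String) (rem : List String) (res : List String) :
    pvLoop2 style rem res true = res ++ rem := by
  induction rem generalizing res with
  | nil => simp [pvLoop2]
  | cons l rest ih => rw [pvLoop2]; simp [Bool.not_true, Bool.and_false, ih]

theorem pvLoop2_false (style : String) (rem : List String) (i : Nat) (res : List String) :
    pvLoop2 style rem res false =
      match pvFindName rem i with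
      | some k => res ++ rem.take (k - i) ++ [pvC1, "style: " ++ style] ++ rem.drop (k - i)
      | none => res ++ rem := by
  induction rem generalizing i res with
  | nil => simp [pvLoop2, pvFindName]
  | cons l rest ih =>
    rw [pvLoop2, pvFindName]
    by_cases ha : PySem.Str.startswith (PySem.Str.strip l) "name:"
    · by_cases hb : PySem.Str.endswith (PySem.Str.strip l) "|"
      · simp only [ha, hb, Bool.not_true, Bool.not_false, Bool.and_true, Bool.and_false,
          Bool.true_and, if_true, Bool.false_eq_true, if_false]
        rw [ih (i + 1)]
        rcases hf : pvFindName rest (i + 1) with _ | k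
        · simp
        · have hk : i + 1 < k := pvFindName_gt rest (i + 1) k hf
          have e1 : k - i = (k - (i + 1)) + 1 := by omega
          simp [e1]
      · simp only [ha, Bool.not_eq_true] at hb
        simp only [ha, hb, Bool.not_true, Bool.not_false, Bool.and_true, Bool.true_and,
          if_true, pvLoop2_true]
        simp
    · simp only [Bool.not_eq_true] at ha
      simp only [ha, Bool.false_and, Bool.false_eq_true, if_false]
      rw [ih (i + 1)]
      rcases hf : pvFindName rest (i + 1) with _ | k
      · simp
      · have hk : i + 1 < k := pvFindName_gt rest (i + 1) k hf
        have e1 : k - i = (k - (i + 1)) + 1 := by omega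
        simp [e1]

-- ===== B-side bridging lemmas =====

-- head of an enumerate/filterMap comprehension = pvFirstN of the predicate
theorem pvHeadEnum (P : Int → String → Bool) (ls : List String) (s : Nat) :
    ((PySem.List.enumerate ls (s : Int)).filterMap
        (fun p => if P p.1 p.2 then some p.1 else none)).head?
      = (pvFirstN (fun n l => P (n : Int) l) ls s).map (fun n => (n : Int)) := by
  induction ls generalizing s with
  | nil => simp [PySem.List.enumerate_nil, pvFirstN]
  | cons l rest ih =>
    rw [PySem.List.enumerate_cons, List.filterMap_cons]
    by_cases h : P (s : Int) l
    · simp [h, pvFirstN]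
    · have e : ((s : Int) + 1) = ((s + 1 : Nat) : Int) := by push_cast; ring
      rw [if_neg h, e]
      simpa [pvFirstN, h] using ih (s + 1)

theorem pvFilterLook (ls : List String) :
    (match ls.filter (fun l => !(PySem.Str.strip l == "")) with
     | [] => true
     | h :: _ => !(PySem.Str.startswith h " ")) = pvLookOk ls := by
  induction ls with
  | nil => rfl
  | cons l rest ih =>
    rw [List.filter_cons, pvLookOk]
    by_cases h : PySem.Str.strip l == ""
    · simp only [h, Bool.not_true, Bool.false_eq_true, if_false, if_true]
      exact ih
    · simp [h]

theorem pvQualifies_eq (lines : List String) (n : Nat) :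
    pvQualifies lines ((n : Int)) = pvLookOk (lines.drop (n + 1)) := by
  unfold pvQualifies
  have e : ((n : Int) + 1) = ((n + 1 : Nat) : Int) := by push_cast; ring
  rw [e, PySem.List.slice_from_natCast]
  exact pvFilterLook (lines.drop (n + 1))

theorem pvFirstN_bounds (P : Nat → String → Bool) (ls : List String) (i t : Nat)
    (h : pvFirstN P ls i = some t) : i ≤ t ∧ t < i + ls.length := by
  induction ls generalizing i with
  | nil => simp [pvFirstN] at h
  | cons l rest ih =>
    rw [pvFirstN] at h
    split_ifs at h with h1
    · simp only [Option.some.injEq] at h; simp [← h]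
    · have := ih (i + 1) h; constructor <;> [omega; (simp; omega)]

-- a style: line is never a tone:/theme: line
theorem pvStyle_not_tone (l : String)
    (h : PySem.Str.startswith (PySem.Str.strip l) "style:" = true) :
    (PySem.Str.startswith (PySem.Str.strip l) "tone:" ||
     PySem.Str.startswith (PySem.Str.strip l) "theme:") = false := by
  have h' := (PySem.Chars.startswith_iff _ _).mp (by simpa using h)
  rw [Bool.or_eq_false_iff]
  constructor
  · by_contra hc
    simp only [Bool.not_eq_false] at hc
    have h2 := (PySem.Chars.startswith_iff _ _).mp (by simpa using hc)
    obtain ⟨u, hu⟩ := h'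
    obtain ⟨v, hv⟩ := h2
    rw [← hu] at hv
    simp at hv
  · by_contra hc
    simp only [Bool.not_eq_false] at hc
    have h2 := (PySem.Chars.startswith_iff _ _).mp (by simpa using hc)
    obtain ⟨u, hu⟩ := h'
    obtain ⟨v, hv⟩ := h2
    rw [← hu] at hv
    simp at hv

-- pvFindTone as a comparison of the two first positions
theorem pvFindTone_char (full : List String) (rem : List String) (i : Nat) :
    pvFindTone full rem i false =
      match pvFirstN (fun n l =>
              (PySem.Str.startswith (PySem.Str.strip l) "tone:" ||
               PySem.Str.startswith (PySem.Str.strip l) "theme:") &&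
              pvLookOk (full.drop (n + 1))) rem i,
            pvFirstN (fun _ l => PySem.Str.startswith (PySem.Str.strip l) "style:") rem i with
      | some t, some s => if t < s then (some (t + 1), false) else (none, true)
      | some t, none => (some (t + 1), false)
      | none, some _ => (none, true)
      | none, none => (none, false) := by
  induction rem generalizing i with
  | nil => simp [pvFindTone, pvFirstN]
  | cons l rest ih =>
    rw [pvFindTone]
    simp only [pvFirstN]
    by_cases h1 : PySem.Str.startswith (PySem.Str.strip l) "style:"
    · have hnt := pvStyle_not_tone l h1
      simp only [h1, hnt, if_pos, Bool.false_and, Bool.false_eq_true, if_false, if_true,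
        pvFindTone_seen]
      rcases hf : pvFirstN (fun n l =>
          (PySem.Str.startswith (PySem.Str.strip l) "tone:" ||
           PySem.Str.startswith (PySem.Str.strip l) "theme:") &&
          pvLookOk (full.drop (n + 1))) rest (i + 1) with _ | t
      · simp
      · have ht := pvFirstN_bounds _ rest (i + 1) t hf
        simp only []
        rw [if_neg (by omega)]
    · by_cases h2 : PySem.Str.startswith (PySem.Str.strip l) "tone:" ||
          PySem.Str.startswith (PySem.Str.strip l) "theme:"
      · by_cases h3 : pvLookOk (full.drop (i + 1))
        · simp only [h1, h2, h3, Bool.not_false, Bool.true_and, Bool.and_self, if_true,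
            Bool.false_eq_true, if_false]
          rcases hs : pvFirstN (fun _ l => PySem.Str.startswith (PySem.Str.strip l) "style:")
              rest (i + 1) with _ | s
          · simp
          · have hsb := pvFirstN_bounds _ rest (i + 1) s hs
            simp only []
            rw [if_pos (by omega)]
        · simp only [h1, h2, h3, Bool.not_false, Bool.true_and, Bool.and_false, if_true,
            Bool.false_eq_true, if_false]
          exact ih (i + 1)
      · simp only [h1, h2, Bool.not_false, Bool.true_and, Bool.false_and,
          Bool.false_eq_true, if_false]
        exact ih (i + 1)

theorem pvFindName_char (rem : List String) (i : Nat) :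
    pvFindName rem i =
      (pvFirstN (fun _ l => PySem.Str.startswith (PySem.Str.strip l) "name:" &&
          !(PySem.Str.endswith (PySem.Str.strip l) "|")) rem i).map (· + 1) := by
  induction rem generalizing i with
  | nil => simp [pvFindName, pvFirstN]
  | cons l rest ih =>
    rw [pvFindName]
    simp only [pvFirstN]
    split_ifs with h
    · simp
    · simpa using ih (i + 1)

theorem pvIsEmpty_eq_head?_isNone {α : Type} (l : List α) : l.isEmpty = l.head?.isNone := by
  cases l <;> rfl

-- specialised forms of pvHeadEnum for the three comprehensions of the B port
theorem pvStyleHead (L : List String) :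
    ((PySem.List.enumerate L 0).filterMap
        (fun p => if PySem.Str.startswith (PySem.Str.strip p.2) "style:" then some p.1 else none)).head?
      = (pvFirstN (fun _ l => PySem.Str.startswith (PySem.Str.strip l) "style:") L 0).map
          (fun n => (n : Int)) := by
  have h := pvHeadEnum (fun _ l => PySem.Str.startswith (PySem.Str.strip l) "style:") L 0
  rw [Nat.cast_zero] at h
  exact h

theorem pvToneHead (L : List String) :
    ((PySem.List.enumerate L 0).filterMap
        (fun p => if (PySem.Str.startswith (PySem.Str.strip p.2) "tone:" ||
                      PySem.Str.startswith (PySem.Str.strip p.2) "theme:") &&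
                     pvQualifies L p.1 then some p.1 else none)).head?
      = (pvFirstN (fun n l =>
            (PySem.Str.startswith (PySem.Str.strip l) "tone:" ||
             PySem.Str.startswith (PySem.Str.strip l) "theme:") &&
            pvLookOk (L.drop (n + 1))) L 0).map (fun n => (n : Int)) := by
  have h := pvHeadEnum (fun i l =>
      (PySem.Str.startswith (PySem.Str.strip l) "tone:" ||
       PySem.Str.startswith (PySem.Str.strip l) "theme:") && pvQualifies L i) L 0
  rw [Nat.cast_zero] at h
  rw [h]
  have e : (fun (n : Nat) (l : String) =>
      (PySem.Str.startswith (PySem.Str.strip l) "tone:" ||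
       PySem.Str.startswith (PySem.Str.strip l) "theme:") && pvQualifies L (n : Int))
      = (fun n l =>
      (PySem.Str.startswith (PySem.Str.strip l) "tone:" ||
       PySem.Str.startswith (PySem.Str.strip l) "theme:") && pvLookOk (L.drop (n + 1))) := by
    funext n l
    rw [pvQualifies_eq]
  rw [e]

theorem pvNameHead (L : List String) :
    ((PySem.List.enumerate L 0).filterMap
        (fun p => if PySem.Str.startswith (PySem.Str.strip p.2) "name:" &&
                     !(PySem.Str.endswith (PySem.Str.strip p.2) "|") then some p.1 else none)).head?
      = (pvFirstN (fun _ l => PySem.Str.startswith (PySem.Str.strip l) "name:" &&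
            !(PySem.Str.endswith (PySem.Str.strip l) "|")) L 0).map (fun n => (n : Int)) := by
  have h := pvHeadEnum (fun _ l => PySem.Str.startswith (PySem.Str.strip l) "name:" &&
      !(PySem.Str.endswith (PySem.Str.strip l) "|")) L 0
  rw [Nat.cast_zero] at h
  exact h

-- ===== VERDICT (by name: the statement is the Claim_ definition above) =====
set_option maxRecDepth 4000 in
theorem inject_style_preset_py_spec : Claim_equal_inject_style_preset_py := by
  intro w sp _
  unfold Spec_inject_style_preset_py
  simp only [inject_style_preset_py, inject_style_preset_py_alt]
  generalize (PySem.Str.split? w "\n").getD [] = L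
  rw [pvLoop1_false, pvFindTone_char, pvIsEmpty_eq_head?_isNone, pvStyleHead, pvToneHead,
    pvNameHead]
  rcases hT : pvFirstN (fun n l =>
      (PySem.Str.startswith (PySem.Str.strip l) "tone:" ||
       PySem.Str.startswith (PySem.Str.strip l) "theme:") &&
      pvLookOk (L.drop (n + 1))) L 0 with _ | t <;>
  rcases hS : pvFirstN (fun _ l => PySem.Str.startswith (PySem.Str.strip l) "style:") L 0
      with _ | s
  · simp only [List.nil_append, Bool.not_false, if_true]
    rw [pvLoop2_false sp L 0, pvFindName_char]
    rcases hN : pvFirstN (fun _ l => PySem.Str.startswith (PySem.Str.strip l) "name:" &&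
        !(PySem.Str.endswith (PySem.Str.strip l) "|")) L 0 with _ | n
    · simp
    · have e : ((n : Int) + 1) = ((n + 1 : Nat) : Int) := by push_cast; ring
      simp
      rw [e, PySem.List.slice_to_natCast, PySem.List.slice_from_natCast]
  · -- no tone, style present
    simp
  · -- tone, no style
    have hb := pvFirstN_bounds _ L 0 t hT
    have hlt : ((t : Int) < (L.length : Int)) := by exact_mod_cast (by omega : t < L.length)
    have e : ((t : Int) + 1) = ((t + 1 : Nat) : Int) := by push_cast; ring
    simp [hlt]
    rw [e, PySem.List.slice_to_natCast, PySem.List.slice_from_natCast]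
  · by_cases hts : t < s
    · have hlt : ((t : Int) < (s : Int)) := by exact_mod_cast hts
      have e : ((t : Int) + 1) = ((t + 1 : Nat) : Int) := by push_cast; ring
      simp [hts, hlt]
      rw [e, PySem.List.slice_to_natCast, PySem.List.slice_from_natCast]
    · have hlt : ¬ ((t : Int) < (s : Int)) := by exact_mod_cast hts
      simp [hts, hlt]
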